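-- pv_equiv track=rewrite | github.com/the-bokya/Advent-of-Code-2024 | 22/1.py | secret_calc
-- ===== SOURCE A (Python) =====
-- def secret_calc(secret_number, n):
--     mix = lambda x, secret_number: x^secret_number
--     prune = lambda x: x % 16777216
--     c = secret_number
--     for i in range(n):
--         c = mix(c*64, c)
--         c = prune(c)
--         c = mix(c//32, c)
--         c = prune(c)
--         c = mix(c*2048, c)
--         c = prune(c)
--     return c
-- ===== SOURCE B (Python) =====
-- def secret_calc(secret_number, n):
--     # One secret-number step x -> prune(mix(...)) is a GF(2)-linear map on 24 bits;
--     # apply its matrix raised to the n-th power by binary exponentiation.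
--     if n <= 0:
--         return secret_number
--     MASK = (1 << 24) - 1
--
--     def step(x):
--         x = (x ^ (x << 6)) & MASK
--         x = (x ^ (x >> 5)) & MASK
--         x = (x ^ (x << 11)) & MASK
--         return x
--
--     def apply(cols, v):
--         acc = 0
--         for j in range(24):
--             if (v >> j) & 1:
--                 acc ^= cols[j]
--         return acc
--
--     def mul(a, b):
--         return [apply(a, c) for c in b]
--
--     base = [step(1 << j) for j in range(24)]
--     power = [1 << j for j in range(24)]  # identity
--     e = n
--     while e > 0:
--         if e & 1:
--             power = mul(base, power)
--         base = mul(base, base)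
--         e >>= 1
--     return apply(power, secret_number % (1 << 24))
-- ===== Notes on version B (the rewrite author's own statement) =====
-- stated objective: faster
-- what changed: A iterates the 24-bit xorshift step n times; B expresses one step as a GF(2)-linear map on 24 bits (columns = images of basis bits) and applies its matrix n-th power computed by binary exponentiation.
import Mathlib
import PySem

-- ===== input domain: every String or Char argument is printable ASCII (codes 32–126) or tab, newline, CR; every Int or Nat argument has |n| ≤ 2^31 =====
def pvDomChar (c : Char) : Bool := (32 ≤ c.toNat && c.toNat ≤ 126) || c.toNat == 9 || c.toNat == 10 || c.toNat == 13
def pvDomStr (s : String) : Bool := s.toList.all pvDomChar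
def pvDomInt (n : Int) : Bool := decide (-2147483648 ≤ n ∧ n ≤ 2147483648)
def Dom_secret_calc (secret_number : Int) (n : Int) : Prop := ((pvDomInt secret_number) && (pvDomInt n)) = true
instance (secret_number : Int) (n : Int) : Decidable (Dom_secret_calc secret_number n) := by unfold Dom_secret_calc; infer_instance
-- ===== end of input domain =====

-- B replaces A's n-fold iteration of the 24-bit xorshift step by binary exponentiation of its
-- GF(2) matrix (columns = images of basis bits), an asymptotically faster algorithm (log n matrix products).


-- ===== PORT A =====
-- literal port of A: for i in range(n): c = prune(mix(c*64,c)); c = prune(mix(c//32,c)); c = prune(mix(c*2048,c))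
def secret_calc (secret_number : Int) (n : Int) : Int :=
  (PySem.List.pyRange 0 n 1).foldl (fun c _ =>
    let c1 := PySem.Int.bxor (c * 64) c
    let c2 := PySem.Int.mod c1 16777216
    let c3 := PySem.Int.bxor (PySem.Int.floordiv c2 32) c2
    let c4 := PySem.Int.mod c3 16777216
    let c5 := PySem.Int.bxor (c4 * 2048) c4
    PySem.Int.mod c5 16777216) secret_number

-- ===== PORT B =====  (port of Source B: GF(2) matrix exponentiation over 24-bit states)
def pvMask : Nat := (1 <<< 24) - 1

def pvStep (x : Nat) : Nat :=
  let a := (x ^^^ (x <<< 6)) &&& pvMask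
  let b := (a ^^^ (a >>> 5)) &&& pvMask
  (b ^^^ (b <<< 11)) &&& pvMask

-- apply(cols, v): xor together the columns at the set bits of v
def pvApply (cols : List Nat) (v : Nat) : Nat :=
  (List.range 24).foldl (fun acc j => if (v >>> j) &&& 1 = 1 then acc ^^^ cols.getD j 0 else acc) 0

def pvMul (a b : List Nat) : List Nat := b.map (pvApply a)

-- the while-loop of Source B (fuel makes the halving loop structural; e ≤ fuel at every call)
def pvPowAux : Nat → Nat → List Nat → List Nat → List Nat
  | 0, _, _, power => power
  | f + 1, e, base, power =>
      if e = 0 then power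
      else pvPowAux f (e >>> 1) (pvMul base base) (if e &&& 1 = 1 then pvMul base power else power)

def secret_calc_alt (secret_number : Int) (n : Int) : Int :=
  if n ≤ 0 then secret_number
  else
    let base := (List.range 24).map (fun j => pvStep (1 <<< j))
    let ident := (List.range 24).map (fun j => 1 <<< j)
    let power := pvPowAux n.toNat n.toNat base ident
    ↑(pvApply power ((PySem.Int.mod secret_number 16777216).toNat))

-- ===== PRECONDITION & SPEC =====
def Spec_secret_calc (secret_number : Int) (n : Int) (out : Int) : Prop := out = secret_calc_alt secret_number n
instance (secret_number : Int) (n : Int) (out : Int) : Decidable (Spec_secret_calc secret_number n out) := by unfold Spec_secret_calc; infer_instance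

-- ===== CLAIM (what is proved, stated in full; the proofs are below) =====
def Claim_equal_secret_calc : Prop := ∀ (secret_number : Int) (n : Int), Dom_secret_calc secret_number n → Spec_secret_calc secret_number n (secret_calc secret_number n)

-- ===== LEMMAS AND PROOFS =====

-- xor-sum of f over a list of indices
def pvXS (f : Nat → Nat) (l : List Nat) : Nat := l.foldr (fun j acc => f j ^^^ acc) 0

theorem pvXS_append (f : Nat → Nat) (l l' : List Nat) :
    pvXS f (l ++ l') = pvXS f l ^^^ pvXS f l' := by
  induction l with
  | nil => simp [pvXS]
  | cons a t ih => simp [pvXS, List.foldr] at ih ⊢; rw [ih, Nat.xor_assoc]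

theorem pvXS_congr (f g : Nat → Nat) (l : List Nat) (h : ∀ j ∈ l, f j = g j) :
    pvXS f l = pvXS g l := by
  induction l with
  | nil => rfl
  | cons a t ih =>
      simp [pvXS, List.foldr] at ih ⊢
      rw [h a (by simp), ih (fun j hj => h j (by simp [hj]))]

theorem pvXS_xor (f g : Nat → Nat) (l : List Nat) :
    pvXS (fun j => f j ^^^ g j) l = pvXS f l ^^^ pvXS g l := by
  induction l with
  | nil => simp [pvXS]
  | cons a t ih =>
      simp only [pvXS, List.foldr] at ih ⊢
      rw [ih]
      rw [Nat.xor_assoc, Nat.xor_assoc]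
      congr 1
      rw [← Nat.xor_assoc, Nat.xor_comm (g a), Nat.xor_assoc]

theorem pvFoldl_XS (cols : List Nat) (v : Nat) (l : List Nat) (a : Nat) :
    l.foldl (fun acc j => if (v >>> j) &&& 1 = 1 then acc ^^^ cols.getD j 0 else acc) a
      = a ^^^ pvXS (fun j => if v.testBit j then cols.getD j 0 else 0) l := by
  induction l generalizing a with
  | nil => simp [pvXS]
  | cons b t ih =>
      simp only [List.foldl, pvXS, List.foldr] at ih ⊢
      rw [ih]
      have hb : ((v >>> b) &&& 1 = 1) ↔ v.testBit b = true := by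
        simp [Nat.testBit_eq_decide_div_mod_eq, Nat.and_one_is_mod, Nat.shiftRight_eq_div_pow]
      by_cases h : v.testBit b = true
      · rw [if_pos (hb.mpr h), if_pos h, Nat.xor_assoc]
      · rw [if_neg (fun hh => h (hb.mp hh)), if_neg h, Nat.zero_xor]

theorem pvApply_eq_XS (cols : List Nat) (v : Nat) :
    pvApply cols v = pvXS (fun j => if v.testBit j then cols.getD j 0 else 0) (List.range 24) := by
  rw [pvApply, pvFoldl_XS, Nat.zero_xor]

theorem pvApply_zero (cols : List Nat) : pvApply cols 0 = 0 := by
  rw [pvApply_eq_XS]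
  rw [pvXS_congr _ (fun _ => 0) _ (by intro j _; simp)]
  induction (List.range 24) with
  | nil => rfl
  | cons a t ih => simp [pvXS, List.foldr]

theorem pvApply_xor (cols : List Nat) (x y : Nat) :
    pvApply cols (x ^^^ y) = pvApply cols x ^^^ pvApply cols y := by
  rw [pvApply_eq_XS, pvApply_eq_XS, pvApply_eq_XS, ← pvXS_xor]
  apply pvXS_congr
  intro j _
  simp only [Nat.testBit_xor]
  cases hx : x.testBit j <;> cases hy : y.testBit j <;> simp

theorem pvApply_lt (cols : List Nat) (h : ∀ c ∈ cols, c < 2 ^ 24) (v : Nat) :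
    pvApply cols v < 2 ^ 24 := by
  rw [pvApply_eq_XS]
  have hterm : ∀ j, (if v.testBit j then cols.getD j 0 else 0) < 2 ^ 24 := by
    intro j
    split
    · rcases Nat.lt_or_ge j cols.length with hj | hj
      · exact h _ (by rw [List.getD_eq_getElem cols 0 hj]; exact List.getElem_mem hj)
      · rw [List.getD_eq_default _ _ hj]; norm_num
    · norm_num
  induction (List.range 24) with
  | nil => norm_num [pvXS]
  | cons a t ih => exact Nat.xor_lt_two_pow (hterm a) ih

theorem pvApply_XS (A : List Nat) (g : Nat → Nat) (l : List Nat) :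
    pvApply A (pvXS g l) = pvXS (fun j => pvApply A (g j)) l := by
  induction l with
  | nil => simp [pvXS, pvApply_zero]
  | cons a t ih => simp only [pvXS, List.foldr] at ih ⊢; rw [pvApply_xor, ih]

theorem pvTestBit_one_shift (i j : Nat) : (1 <<< i).testBit j = decide (j = i) := by
  rcases Nat.lt_trichotomy j i with h | h | h
  · simp only [Nat.testBit_shiftLeft]
    have h1 : decide (j ≥ i) = false := by simp; omega
    have h2 : decide (j = i) = false := by simp; omega
    rw [h1, h2, Bool.false_and]
  · subst h; simp [Nat.testBit_shiftLeft]
  · simp only [Nat.testBit_shiftLeft]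
    have h1 : (decide (j ≥ i)) = true := by simp; omega
    have h2 : decide (j = i) = false := by simp; omega
    have h3 : Nat.testBit 1 (j - i) = false := by
      rw [← Bool.not_eq_true, Nat.testBit_one_eq_true_iff_self_eq_zero]; omega
    rw [h1, h2, h3, Bool.true_and]

theorem pvDecomp (v i : Nat) (h : ∀ j, i + 1 ≤ j → v.testBit j = false) :
    v = (v % 2 ^ i) ^^^ (if v.testBit i then 1 <<< i else 0) := by
  apply Nat.eq_of_testBit_eq
  intro j
  have htop : (if v.testBit i = true then 1 <<< i else 0).testBit j
      = (v.testBit i && decide (j = i)) := by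
    split <;> rename_i hb <;>
      simp only [pvTestBit_one_shift, hb, Bool.true_and, Bool.false_and, Nat.zero_testBit]
  rw [Nat.testBit_xor, Nat.testBit_mod_two_pow, htop]
  rcases Nat.lt_trichotomy j i with hj | hj | hj
  · have : decide (j = i) = false := by simp; omega
    simp [hj, this]
  · subst hj
    simp
  · rw [h j (by omega)]
    have h1 : decide (j < i) = false := by simp; omega
    have h2 : decide (j = i) = false := by simp; omega
    simp [h1, h2]

theorem pvXS_basis (f : Nat → Nat) (f0 : f 0 = 0)
    (flin : ∀ x y, f (x ^^^ y) = f x ^^^ f y) :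
    ∀ i v, (∀ j, i ≤ j → v.testBit j = false) →
      pvXS (fun j => if v.testBit j then f (1 <<< j) else 0) (List.range i) = f v := by
  intro i
  induction i with
  | zero =>
      intro v hv
      have : v = 0 := Nat.eq_of_testBit_eq (fun j => by rw [hv j (Nat.zero_le j)]; simp)
      subst this
      simp [pvXS, f0]
  | succ i ih =>
      intro v hv
      rw [List.range_succ, pvXS_append]
      have hlow : pvXS (fun j => if v.testBit j then f (1 <<< j) else 0) (List.range i)
          = f (v % 2 ^ i) := by
        rw [pvXS_congr _ (fun j => if (v % 2 ^ i).testBit j then f (1 <<< j) else 0) _ ?_]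
        · exact ih (v % 2 ^ i) (fun j hj => by
            rw [Nat.testBit_mod_two_pow]
            have : decide (j < i) = false := by simp; omega
            simp [this])
        · intro j hj
          rw [List.mem_range] at hj
          simp only [Nat.testBit_mod_two_pow]
          simp [hj]
      rw [hlow]
      have htop : pvXS (fun j => if v.testBit j then f (1 <<< j) else 0) [i]
          = f (if v.testBit i then 1 <<< i else 0) := by
        simp only [pvXS, List.foldr]
        split <;> simp [f0]
      rw [htop, ← flin, ← pvDecomp v i (fun j hj => hv j (by omega))]

theorem pvGetD_range_map (g : Nat → Nat) (j : Nat) (hj : j < 24) :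
    (((List.range 24).map g).getD j 0) = g j := by
  rw [List.getD_eq_getElem _ 0 (by simpa)]
  simp

theorem pvShiftLeft_xor (x y k : Nat) : (x ^^^ y) <<< k = (x <<< k) ^^^ (y <<< k) := by
  apply Nat.eq_of_testBit_eq
  intro i
  simp [Nat.testBit_shiftLeft, Nat.testBit_xor]
  by_cases h : k ≤ i <;> simp [h]

theorem pvShiftRight_xor (x y k : Nat) : (x ^^^ y) >>> k = (x >>> k) ^^^ (y >>> k) := by
  apply Nat.eq_of_testBit_eq
  intro i
  simp [Nat.testBit_shiftRight, Nat.testBit_xor]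

theorem pvStep_xor (x y : Nat) : pvStep (x ^^^ y) = pvStep x ^^^ pvStep y := by
  have hre : ∀ a b c d : Nat, (a ^^^ b) ^^^ (c ^^^ d) = (a ^^^ c) ^^^ (b ^^^ d) := by
    intro a b c d
    rw [Nat.xor_assoc, Nat.xor_assoc]
    congr 1
    rw [← Nat.xor_assoc, Nat.xor_comm b c, Nat.xor_assoc]
  have h1 : ∀ u w : Nat, ((u ^^^ w) ^^^ (u ^^^ w) <<< 6) &&& pvMask
      = ((u ^^^ u <<< 6) &&& pvMask) ^^^ ((w ^^^ w <<< 6) &&& pvMask) := by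
    intro u w; rw [pvShiftLeft_xor, hre, Nat.and_xor_distrib_right]
  have h2 : ∀ u w : Nat, ((u ^^^ w) ^^^ (u ^^^ w) >>> 5) &&& pvMask
      = ((u ^^^ u >>> 5) &&& pvMask) ^^^ ((w ^^^ w >>> 5) &&& pvMask) := by
    intro u w; rw [pvShiftRight_xor, hre, Nat.and_xor_distrib_right]
  have h3 : ∀ u w : Nat, ((u ^^^ w) ^^^ (u ^^^ w) <<< 11) &&& pvMask
      = ((u ^^^ u <<< 11) &&& pvMask) ^^^ ((w ^^^ w <<< 11) &&& pvMask) := by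
    intro u w; rw [pvShiftLeft_xor, hre, Nat.and_xor_distrib_right]
  simp only [pvStep]
  rw [h1, h2, h3]

theorem pvStep_lt (x : Nat) : pvStep x < 2 ^ 24 := by
  have h : pvStep x ≤ pvMask := Nat.and_le_right
  have hm : pvMask = 2 ^ 24 - 1 := by decide
  omega

theorem pvIter_lt (k v : Nat) (h : v < 2 ^ 24) : pvStep^[k] v < 2 ^ 24 := by
  induction k with
  | zero => simpa
  | succ k ih => rw [Function.iterate_succ_apply']; exact pvStep_lt _

-- "M represents pvStep^[k] on 24-bit states"
def pvRep (M : List Nat) (k : Nat) : Prop :=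
  M.length = 24 ∧ (∀ c ∈ M, c < 2 ^ 24) ∧ ∀ v, v < 2 ^ 24 → pvApply M v = pvStep^[k] v

theorem pvApply_basis (f : Nat → Nat) (f0 : f 0 = 0)
    (flin : ∀ x y, f (x ^^^ y) = f x ^^^ f y) (v : Nat) (hv : v < 2 ^ 24) :
    pvApply ((List.range 24).map (fun j => f (1 <<< j))) v = f v := by
  rw [pvApply_eq_XS]
  rw [pvXS_congr _ (fun j => if v.testBit j then f (1 <<< j) else 0) _ ?_]
  · exact pvXS_basis f f0 flin 24 v (fun j hj =>
      Nat.testBit_lt_two_pow (lt_of_lt_of_le hv (Nat.pow_le_pow_right (by norm_num) hj)))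
  · intro j hj
    rw [List.mem_range] at hj
    rw [pvGetD_range_map _ _ hj]

theorem pvRep_base : pvRep ((List.range 24).map (fun j => pvStep (1 <<< j))) 1 := by
  refine ⟨by simp, ?_, ?_⟩
  · intro c hc
    rw [List.mem_map] at hc
    obtain ⟨j, _, rfl⟩ := hc
    exact pvStep_lt _
  · intro v hv
    rw [Function.iterate_one]
    exact pvApply_basis pvStep (by decide) pvStep_xor v hv

theorem pvRep_id : pvRep ((List.range 24).map (fun j => 1 <<< j)) 0 := by
  refine ⟨by simp, ?_, ?_⟩
  · intro c hc
    rw [List.mem_map] at hc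
    obtain ⟨j, hj, rfl⟩ := hc
    rw [List.mem_range] at hj
    rw [Nat.one_shiftLeft]
    exact Nat.pow_lt_pow_right (by norm_num) hj
  · intro v hv
    rw [Function.iterate_zero, id_eq]
    exact pvApply_basis id rfl (fun _ _ => rfl) v hv

theorem pvRep_mul (A B : List Nat) (j k : Nat) (hA : pvRep A j) (hB : pvRep B k) :
    pvRep (pvMul A B) (j + k) := by
  obtain ⟨hAl, hAb, hAe⟩ := hA
  obtain ⟨hBl, hBb, hBe⟩ := hB
  refine ⟨by simp [pvMul, hBl], ?_, ?_⟩
  · intro c hc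
    rw [pvMul, List.mem_map] at hc
    obtain ⟨b, _, rfl⟩ := hc
    exact pvApply_lt A hAb _
  · intro v hv
    have hcomp : pvApply (pvMul A B) v = pvApply A (pvApply B v) := by
      rw [pvApply_eq_XS (pvMul A B) v, pvApply_eq_XS B v, pvApply_XS]
      apply pvXS_congr
      intro i hi
      rw [List.mem_range] at hi
      have hmap : (pvMul A B).getD i 0 = pvApply A (B.getD i 0) := by
        rw [pvMul]
        have : (0 : Nat) = pvApply A 0 := (pvApply_zero A).symm
        rw [this, List.getD_map]
        rw [← this]
      rw [hmap]
      split
      · rfl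
      · rw [pvApply_zero]
    rw [hcomp, hBe v hv, hAe _ (pvIter_lt k v hv), ← Function.iterate_add_apply]

theorem pvRep_pow (f : Nat) : ∀ (e : Nat), e ≤ f → ∀ (base power : List Nat) (j k : Nat),
    pvRep base j → pvRep power k →
    pvRep (pvPowAux f e base power) (e * j + k) := by
  induction f with
  | zero =>
      intro e he base power j k hb hp
      have : e = 0 := by omega
      subst this
      simpa [pvPowAux] using hp
  | succ f ih =>
      intro e he base power j k hb hp
      by_cases h0 : e = 0
      · subst h0; simpa [pvPowAux] using hp
      · rw [pvPowAux, if_neg h0]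
        have hhalf : e >>> 1 = e / 2 := Nat.shiftRight_one e
        have hle : e >>> 1 ≤ f := by rw [hhalf]; omega
        have hbb : pvRep (pvMul base base) (j + j) := pvRep_mul _ _ _ _ hb hb
        have hodd : e &&& 1 = e % 2 := Nat.and_one_is_mod e
        by_cases hpar : e &&& 1 = 1
        · rw [if_pos hpar]
          have hp' : pvRep (pvMul base power) (j + k) := pvRep_mul _ _ _ _ hb hp
          have := ih (e >>> 1) hle (pvMul base base) (pvMul base power) (j + j) (j + k) hbb hp'
          have harith : e >>> 1 * (j + j) + (j + k) = e * j + k := by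
            have he2 : e % 2 = 1 := by omega
            have hdm : e / 2 * 2 + e % 2 = e := by omega
            calc e >>> 1 * (j + j) + (j + k) = (e / 2 * 2 + 1) * j + k := by rw [hhalf]; ring
              _ = e * j + k := by rw [← he2, hdm]
          rwa [harith] at this
        · rw [if_neg hpar]
          have := ih (e >>> 1) hle (pvMul base base) power (j + j) k hbb hp
          have harith : e >>> 1 * (j + j) + k = e * j + k := by
            have he2 : e % 2 = 0 := by omega
            have hdm : e / 2 * 2 + e % 2 = e := by omega
            calc e >>> 1 * (j + j) + k = (e / 2 * 2 + 0) * j + k := by rw [hhalf]; ring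
              _ = e * j + k := by rw [← he2, hdm]
          rwa [harith] at this

-- ===== A-side =====

theorem pvCast16 : ((16777216 : Nat) : Int) = (16777216 : Int) := by norm_num

-- Nat-side congruence for the first stage, nonnegative case
theorem pvG1 (t : Nat) :
    (t * 64 ^^^ t) % 16777216 = ((t % 16777216) ^^^ (t % 16777216) <<< 6) &&& pvMask := by
  have hmask : pvMask = 2 ^ 24 - 1 := by decide
  rw [hmask, Nat.and_two_pow_sub_one_eq_mod]
  have h64 : ∀ x : Nat, x * 64 = x <<< 6 := fun x => by rw [Nat.shiftLeft_eq]
  rw [h64]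
  apply Nat.eq_of_testBit_eq
  intro i
  have h16 : (16777216 : Nat) = 2 ^ 24 := by norm_num
  rw [h16]
  simp only [Nat.testBit_mod_two_pow, Nat.testBit_xor, Nat.testBit_shiftLeft]
  by_cases h24 : i < 24
  · have h1 : decide (i < 24) = true := by simp [h24]
    rw [h1]
    simp only [Bool.true_and]
    by_cases h6 : 6 ≤ i
    · have h2 : decide (i ≥ 6) = true := by simp [h6]
      have h3 : decide (i - 6 < 24) = true := by simp; omega
      rw [h2, h3]
      simp [Bool.xor_comm]
    · have h2 : decide (i ≥ 6) = false := by simp [h6]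
      rw [h2]
      simp [Bool.xor_comm]
  · have h1 : decide (i < 24) = false := by simp [h24]
    rw [h1]
    simp

-- Nat-side congruence for the first stage, negative case (m encodes c = -m-1)
theorem pvG2 (m : Nat) :
    ((64 * m + 63) ^^^ m) % 16777216
      = ((16777215 - m % 16777216) ^^^ (16777215 - m % 16777216) <<< 6) &&& pvMask := by
  have hmask : pvMask = 2 ^ 24 - 1 := by decide
  rw [hmask, Nat.and_two_pow_sub_one_eq_mod]
  have h16 : (16777216 : Nat) = 2 ^ 24 := by norm_num
  have hs : 16777215 - m % 16777216 = 2 ^ 24 - (m % 16777216 + 1) := by omega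
  have h63 : 64 * m + 63 = 2 ^ 6 * m + 63 := by ring_nf
  rw [hs, h63, h16]
  have hm24' : m % 2 ^ 24 < 2 ^ 24 := Nat.mod_lt _ (by norm_num)
  apply Nat.eq_of_testBit_eq
  intro i
  simp only [Nat.testBit_mod_two_pow, Nat.testBit_xor,
    Nat.testBit_two_pow_mul_add m (show (63:Nat) < 2 ^ 6 by norm_num),
    Nat.testBit_shiftLeft, Nat.testBit_two_pow_sub_succ hm24']
  by_cases h24 : i < 24
  · have h1 : decide (i < 24) = true := by simp [h24]
    rw [h1]
    simp only [Bool.true_and]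
    by_cases h6 : i < 6
    · have h2 : decide (i ≥ 6) = false := by simp; omega
      rw [if_pos h6, h2]
      have h63b : (63 : Nat).testBit i = true := by
        have h : (63 : Nat) = 2 ^ 6 - 1 := by norm_num
        rw [h, Nat.testBit_two_pow_sub_one]
        simp [h6]
      rw [h63b]
      cases hb : m.testBit i <;> simp
    · have h2 : decide (i ≥ 6) = true := by simp; omega
      rw [if_neg h6, h2]
      have h3 : decide (i - 6 < 24) = true := by simp; omega
      rw [h3]
      simp only [Bool.true_and]
      cases hb : m.testBit (i - 6) <;> cases hc : m.testBit i <;> simp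
  · have h1 : decide (i < 24) = false := by simp [h24]
    rw [h1]
    simp

-- stage 1: Python ((c*64)^c) % 2^24 computed from the 24-bit residue of c
theorem pvStage1 (c : Int) :
    PySem.Int.mod (PySem.Int.bxor (c * 64) c) 16777216
      = (((((PySem.Int.mod c 16777216).toNat) ^^^ ((PySem.Int.mod c 16777216).toNat) <<< 6) &&& pvMask : Nat) : Int) := by
  by_cases hc : 0 ≤ c
  · set t := c.toNat with ht
    have hct : c = (t : Int) := by omega
    rw [hct]
    rw [show ((t : Int) * 64) = ((t * 64 : Nat) : Int) by push_cast; ring]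
    rw [PySem.Int.bxor_natCast, ← pvCast16, PySem.Int.mod_natCast, PySem.Int.mod_natCast]
    rw [Int.toNat_natCast]
    exact_mod_cast pvG1 t
  · set m := (-c - 1).toNat with hm
    have hcm : (m : Int) = -c - 1 := by omega
    have hneg1 : ¬ (0 ≤ c * 64) := by omega
    have h64 : (-(c * 64) - 1).toNat = 64 * m + 63 := by omega
    have hxor : PySem.Int.bxor (c * 64) c = (((64 * m + 63) ^^^ m : Nat) : Int) := by
      rw [PySem.Int.bxor]
      rw [if_neg hneg1, if_neg (by omega)]
      rw [h64]
    rw [hxor, ← pvCast16, PySem.Int.mod_natCast]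
    have hs : (PySem.Int.mod c ((16777216 : Nat) : Int)).toNat = 16777215 - m % 16777216 := by
      rw [pvCast16, PySem.Int.mod_eq_emod_of_pos (by norm_num)]
      omega
    rw [hs]
    exact_mod_cast pvG2 m

-- stage 2: Python ((a//32)^a) % 2^24 for a 24-bit a
theorem pvStage2 (a : Nat) :
    PySem.Int.mod (PySem.Int.bxor (PySem.Int.floordiv ((a : Nat) : Int) 32) ((a : Nat) : Int)) 16777216
      = (((a ^^^ a >>> 5) &&& pvMask : Nat) : Int) := by
  rw [show ((32 : Int)) = ((32 : Nat) : Int) by norm_num, PySem.Int.floordiv_natCast,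
      PySem.Int.bxor_natCast, ← pvCast16, PySem.Int.mod_natCast]
  congr 1
  rw [show pvMask = 2 ^ 24 - 1 by decide, Nat.and_two_pow_sub_one_eq_mod,
      Nat.shiftRight_eq_div_pow]
  rw [Nat.xor_comm]

-- stage 3: Python ((a*2048)^a) % 2^24 for a 24-bit a
theorem pvStage3 (a : Nat) :
    PySem.Int.mod (PySem.Int.bxor (((a : Nat) : Int) * 2048) ((a : Nat) : Int)) 16777216
      = (((a ^^^ a <<< 11) &&& pvMask : Nat) : Int) := by
  rw [show (((a : Nat) : Int) * 2048) = ((a * 2048 : Nat) : Int) by push_cast; ring,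
      PySem.Int.bxor_natCast, ← pvCast16, PySem.Int.mod_natCast]
  congr 1
  rw [show pvMask = 2 ^ 24 - 1 by decide, Nat.and_two_pow_sub_one_eq_mod,
      Nat.shiftLeft_eq]
  rw [Nat.xor_comm]

def pvIntStep (c : Int) : Int :=
  let c1 := PySem.Int.bxor (c * 64) c
  let c2 := PySem.Int.mod c1 16777216
  let c3 := PySem.Int.bxor (PySem.Int.floordiv c2 32) c2
  let c4 := PySem.Int.mod c3 16777216
  let c5 := PySem.Int.bxor (c4 * 2048) c4
  PySem.Int.mod c5 16777216

theorem pvIntStep_eq (c : Int) :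
    pvIntStep c = ((pvStep ((PySem.Int.mod c 16777216).toNat) : Nat) : Int) := by
  simp only [pvIntStep, pvStep]
  rw [pvStage1, pvStage2, pvStage3]

theorem pvFoldl_const (g : Int → Int) (l : List Int) (a : Int) :
    l.foldl (fun c _ => g c) a = g^[l.length] a := by
  induction l generalizing a with
  | nil => rfl
  | cons x t ih =>
      simp only [List.foldl, List.length_cons]
      rw [ih, ← Function.iterate_succ_apply]

theorem secret_calc_eq_iter (s n : Int) :
    secret_calc s n = pvIntStep^[n.toNat] s := by
  have h : secret_calc s n = (PySem.List.pyRange 0 n 1).foldl (fun c _ => pvIntStep c) s := rfl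
  rw [h, pvFoldl_const, PySem.List.length_pyRange_one]
  norm_num

theorem pvIter_eq (k : Nat) (s : Int) :
    pvIntStep^[k + 1] s = ((pvStep^[k + 1] ((PySem.Int.mod s 16777216).toNat) : Nat) : Int) := by
  induction k with
  | zero => simpa using pvIntStep_eq s
  | succ k ih =>
      rw [Function.iterate_succ_apply', ih, pvIntStep_eq]
      have hlt : pvStep^[k + 1] ((PySem.Int.mod s 16777216).toNat) < 2 ^ 24 := by
        rw [Function.iterate_succ_apply']
        exact pvStep_lt _
      congr 1
      rw [Function.iterate_succ_apply' pvStep (k + 1)]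
      congr 1
      rw [← pvCast16, PySem.Int.mod_natCast, Int.toNat_natCast]
      have : (16777216 : Nat) = 2 ^ 24 := by norm_num
      rw [this]
      exact Nat.mod_eq_of_lt hlt

-- ===== VERDICT (by name: the statement is the Claim_ definition above) =====
theorem secret_calc_spec : Claim_equal_secret_calc := by
  intro s n _
  show secret_calc s n = secret_calc_alt s n
  by_cases hn : n ≤ 0
  · simp only [secret_calc_alt, if_pos hn]
    rw [secret_calc_eq_iter]
    have h0 : n.toNat = 0 := by omega
    rw [h0, Function.iterate_zero, id_eq]
  · simp only [secret_calc_alt, if_neg hn]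
    have hrep := pvRep_pow n.toNat n.toNat (le_refl _)
      ((List.range 24).map (fun j => pvStep (1 <<< j)))
      ((List.range 24).map (fun j => 1 <<< j)) 1 0 pvRep_base pvRep_id
    rw [Nat.mul_one, Nat.add_zero] at hrep
    have hs0 : (PySem.Int.mod s 16777216).toNat < 2 ^ 24 := by
      have h1 := PySem.Int.mod_nonneg s (show (0:Int) < 16777216 by norm_num)
      have h2 := PySem.Int.mod_lt s (show (0:Int) < 16777216 by norm_num)
      omega
    rw [hrep.2.2 _ hs0, secret_calc_eq_iter]
    have hk : n.toNat = (n.toNat - 1) + 1 := by omega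
    rw [hk]
    exact pvIter_eq (n.toNat - 1) s
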